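-- pv_equiv track=rewrite | github.com/aswini1328/smart-resource-allocation | Priority Scoring & Matching/app.py | skill_relevance
-- ===== SOURCE A (Python) =====
-- def skill_relevance(need_category, volunteer_skills):
--     need_cat = need_category.lower().strip()
--     skills = [x.strip().lower() for x in volunteer_skills.split(',') if x.strip()]
--     if need_cat in skills:
--         return 0
--     if any(need_cat in s or s in need_cat for s in skills):
--         return 1
--     return 2
-- ===== SOURCE B (Python) =====
-- def skill_relevance(need_category, volunteer_skills):
--     need = need_category.lower().strip()
--
--     def token_score(tok):
--         t = tok.strip().lower()
--         if not t:
--             return 2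
--         if t == need:
--             return 0
--         if need in t or t in need:
--             return 1
--         return 2
--
--     best = 2
--     rest, more = volunteer_skills, True
--     while more:
--         head, sep, rest = rest.partition(',')
--         best = min(best, token_score(head))
--         more = bool(sep)
--     return best
-- ===== Notes on version B (the rewrite author's own statement) =====
-- stated objective: alternative
-- what changed: Replaces split-into-a-list plus two staged boolean scans (exact membership, then any-substring) by a partition-driven tokenizer that never builds the skill list and a per-token total score function (0/1/2) combined by a running min, so the 0/1/2 priority emerges from the min lattice rather than from an if-chain over the whole list.
import Mathlib
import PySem

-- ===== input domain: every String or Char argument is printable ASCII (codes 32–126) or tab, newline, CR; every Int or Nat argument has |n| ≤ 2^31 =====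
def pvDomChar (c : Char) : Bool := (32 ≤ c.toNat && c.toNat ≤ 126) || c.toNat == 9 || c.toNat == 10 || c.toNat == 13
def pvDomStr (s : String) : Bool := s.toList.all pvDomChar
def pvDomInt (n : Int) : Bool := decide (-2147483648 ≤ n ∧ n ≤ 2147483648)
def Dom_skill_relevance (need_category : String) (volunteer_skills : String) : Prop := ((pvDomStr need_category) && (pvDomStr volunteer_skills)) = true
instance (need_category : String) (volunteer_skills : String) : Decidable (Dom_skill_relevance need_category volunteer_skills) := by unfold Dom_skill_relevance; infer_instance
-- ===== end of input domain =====

-- B replaces A's build-a-list-then-two-staged-scans with a partition-driven tokenizer and a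
-- per-token total score combined by a running min (alternative decomposition, same cost).

-- ===== PORT A =====
def skill_relevance (need_category : String) (volunteer_skills : String) : Int :=
  let need_cat := PySem.Chars.strip (PySem.Chars.lower need_category.toList)
  -- volunteer_skills.split(',') with a nonempty literal separator: split? always returns some; .getD [] only totalizes
  let skills := (((PySem.Chars.split? volunteer_skills.toList [',']).getD []).filter
      (fun x => !(PySem.Chars.strip x).isEmpty)).map
      (fun x => PySem.Chars.lower (PySem.Chars.strip x))
  if skills.contains need_cat then 0
  else if skills.any (fun s => PySem.Chars.isIn need_cat s || PySem.Chars.isIn s need_cat) then 1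
  else 2

-- ===== PORT B =====
-- hand port of rest.partition(',') for the single-char separator (exact): (text before the first
-- comma, some (text after it)) when a comma occurs, (rest, none) when it does not
def partComma : List Char → List Char × Option (List Char)
  | [] => ([], none)
  | c :: rest =>
    if c = ',' then ([], some rest)
    else
      let p := partComma rest
      (c :: p.1, p.2)

theorem partComma_some_length (l h t : List Char) (hp : partComma l = (h, some t)) :
    t.length < l.length := by
  induction l generalizing h t with
  | nil => simp [partComma] at hp
  | cons c rest ih =>
    by_cases hc : c = ','
    · simp [partComma, hc] at hp
      obtain ⟨_, rfl⟩ := hp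
      simp
    · simp [partComma, hc] at hp
      cases hpr : (partComma rest).2 with
      | none => rw [hpr] at hp; exact absurd hp.2 (by simp)
      | some t' =>
        rw [hpr] at hp
        obtain ⟨_, ht⟩ := hp
        have := ih (partComma rest).1 t' (by rw [← hpr])
        simp at ht
        subst ht
        exact Nat.lt_succ_of_lt this

-- B's per-token score: 0 exact, 1 substring either way, 2 otherwise (empty token scores 2)
def tokenScore (need : List Char) (tok : List Char) : Int :=
  let t := PySem.Chars.lower (PySem.Chars.strip tok)
  if t.isEmpty then 2
  else if t = need then 0
  else if PySem.Chars.isIn need t || PySem.Chars.isIn t need then 1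
  else 2

-- B's while loop: peel one token with partition, fold its score into the running min
def srLoop (need : List Char) (rest : List Char) (best : Int) : Int :=
  match hp : partComma rest with
  | (head, none) => min best (tokenScore need head)
  | (head, some tail) => srLoop need tail (min best (tokenScore need head))
termination_by rest.length
decreasing_by exact partComma_some_length rest head tail hp

def skill_relevance_alt (need_category : String) (volunteer_skills : String) : Int :=
  srLoop (PySem.Chars.strip (PySem.Chars.lower need_category.toList)) volunteer_skills.toList 2

-- ===== PRECONDITION & SPEC =====
def Spec_skill_relevance (need_category : String) (volunteer_skills : String) (out : Int) : Prop := out = skill_relevance_alt need_category volunteer_skills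
instance (need_category : String) (volunteer_skills : String) (out : Int) : Decidable (Spec_skill_relevance need_category volunteer_skills out) := by unfold Spec_skill_relevance; infer_instance

-- ===== CLAIM (what is proved, stated in full; the proofs are below) =====
def Claim_equal_skill_relevance : Prop := ∀ (need_category : String) (volunteer_skills : String), Dom_skill_relevance need_category volunteer_skills → Spec_skill_relevance need_category volunteer_skills (skill_relevance need_category volunteer_skills)

-- ===== LEMMAS AND PROOFS =====

-- structural form of splitting on a single comma
def splitComma : List Char → List (List Char)
  | [] => [[]]
  | c :: rest =>
    if c = ',' then [] :: splitComma rest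
    else
      match splitComma rest with
      | [] => [[c]]
      | t :: ts => (c :: t) :: ts

theorem splitComma_ne_nil (l : List Char) : splitComma l ≠ [] := by
  cases l with
  | nil => simp [splitComma]
  | cons c rest =>
    simp only [splitComma]
    split_ifs
    · simp
    · cases splitComma rest <;> simp

def prep (p : List Char) : List (List Char) → List (List Char)
  | [] => [p]
  | t :: ts => (p ++ t) :: ts

theorem prep_of_ne_nil (L : List (List Char)) (h : L ≠ []) : prep [] L = L := by
  cases L with
  | nil => exact absurd rfl h
  | cons t ts => simp [prep]

theorem go_spec (fuel : Nat) : ∀ (l cur : List Char) (acc : List (List Char)),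
    l.length ≤ fuel →
    PySem.Chars.splitOn.go [','] fuel l cur acc = acc.reverse ++ prep cur.reverse (splitComma l) := by
  induction fuel with
  | zero =>
    intro l cur acc hl
    have : l = [] := List.eq_nil_of_length_eq_zero (Nat.le_zero.mp hl)
    subst this
    simp [PySem.Chars.splitOn.go, splitComma, prep]
  | succ f ih =>
    intro l cur acc hl
    cases l with
    | nil => simp [PySem.Chars.splitOn.go, splitComma, prep]
    | cons c rest =>
      by_cases hc : c = ','
      · subst hc
        have hpre : List.isPrefixOf [','] (',' :: rest) = true := by simp [List.isPrefixOf]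
        rw [PySem.Chars.splitOn.go, if_pos hpre]
        simp only [List.length_singleton, List.drop_succ_cons, List.drop_zero]
        rw [ih rest [] (cur.reverse :: acc) (by simpa using Nat.le_of_succ_le_succ hl)]
        simp only [splitComma, if_pos rfl, List.reverse_cons, List.reverse_nil]
        rw [prep_of_ne_nil _ (splitComma_ne_nil rest)]
        simp [prep]
      · have hpre : List.isPrefixOf [','] (c :: rest) = false := by
          simp [List.isPrefixOf, hc]
          intro h; exact absurd h.symm hc
        rw [PySem.Chars.splitOn.go, if_neg (by simp [hpre])]
        rw [ih rest (c :: cur) acc (by simpa using Nat.le_of_succ_le_succ hl)]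
        simp only [splitComma, if_neg hc, List.reverse_cons]
        cases hsc : splitComma rest with
        | nil => exact absurd hsc (splitComma_ne_nil rest)
        | cons t ts => simp [prep]

theorem splitOn_comma (l : List Char) : PySem.Chars.splitOn l [','] = splitComma l := by
  unfold PySem.Chars.splitOn
  rw [go_spec (l.length + 1) l [] [] (Nat.le_succ _)]
  simp [prep_of_ne_nil _ (splitComma_ne_nil l)]

-- B's substring relation, per-token score and A's staged value, at the cleaned-token level
def relB (need s : List Char) : Bool := PySem.Chars.isIn need s || PySem.Chars.isIn s need

def scoreC (need y : List Char) : Int := if y = need then 0 else if relB need y then 1 else 2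

def avC (need : List Char) (cl : List (List Char)) : Int :=
  if cl.contains need then 0 else if cl.any (relB need) then 1 else 2

-- A's staged value over the raw token list
def aVal (need : List Char) (L : List (List Char)) : Int :=
  avC need ((L.filter (fun x => !(PySem.Chars.strip x).isEmpty)).map
      (fun x => PySem.Chars.lower (PySem.Chars.strip x)))

theorem avC_bounds (need : List Char) (cl : List (List Char)) :
    0 ≤ avC need cl ∧ avC need cl ≤ 2 := by
  unfold avC; split_ifs <;> omega

theorem aVal_bounds (need : List Char) (L : List (List Char)) :
    0 ≤ aVal need L ∧ aVal need L ≤ 2 := avC_bounds _ _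

theorem tokenScore_bounds (need tok : List Char) :
    0 ≤ tokenScore need tok ∧ tokenScore need tok ≤ 2 := by
  unfold tokenScore
  dsimp only
  split_ifs <;> omega

theorem lower_strip_empty (x : List Char) :
    (PySem.Chars.lower (PySem.Chars.strip x)).isEmpty = (PySem.Chars.strip x).isEmpty := by
  simp [PySem.Chars.lower]

theorem avC_cons (need y : List Char) (cl : List (List Char)) :
    avC need (y :: cl) = min (scoreC need y) (avC need cl) := by
  unfold avC scoreC
  simp only [List.contains_cons, List.any_cons]
  by_cases hy : y = need
  · have hb : (need == y) = true := by simp [hy]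
    simp only [hb, Bool.true_or, if_true, if_pos hy]
    split_ifs <;> omega
  · have hb : (need == y) = false := by
      simp only [beq_eq_false_iff_ne, ne_eq]
      exact fun h => hy h.symm
    simp only [hb, Bool.false_or, if_neg hy]
    by_cases hcon : cl.contains need = true
    · rw [if_pos hcon, if_pos hcon]
      split_ifs <;> omega
    · rw [if_neg hcon, if_neg hcon]
      by_cases hrel : relB need y = true
      · rw [if_pos (by simp [hrel] : (relB need y || cl.any (relB need)) = true), if_pos hrel]
        split_ifs <;> omega
      · rw [if_neg hrel]
        by_cases hany : cl.any (relB need) = true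
        · rw [if_pos (by simp [hany] : (relB need y || cl.any (relB need)) = true), if_pos hany]
          omega
        · rw [if_neg (by simp [hrel, hany] :
              ¬ (relB need y || cl.any (relB need)) = true), if_neg hany]
          omega

theorem aVal_cons (need x : List Char) (L : List (List Char)) :
    aVal need (x :: L) = min (tokenScore need x) (aVal need L) := by
  by_cases hemp : (PySem.Chars.strip x).isEmpty
  · have h1 : aVal need (x :: L) = aVal need L := by
      unfold aVal
      rw [List.filter_cons, if_neg (by simp [hemp])]
    have h2 : tokenScore need x = 2 := by
      unfold tokenScore
      dsimp only
      rw [lower_strip_empty, if_pos hemp]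
    rw [h1, h2]
    have := aVal_bounds need L
    omega
  · have h2 : tokenScore need x = scoreC need (PySem.Chars.lower (PySem.Chars.strip x)) := by
      unfold tokenScore scoreC relB
      dsimp only
      rw [lower_strip_empty, if_neg hemp]
    have h1 : aVal need (x :: L) =
        avC need (PySem.Chars.lower (PySem.Chars.strip x) ::
          (L.filter (fun x => !(PySem.Chars.strip x).isEmpty)).map
            (fun x => PySem.Chars.lower (PySem.Chars.strip x))) := by
      unfold aVal
      rw [List.filter_cons, if_pos (by simp [hemp]), List.map_cons]
    rw [h1, avC_cons, h2]
    rfl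

theorem aVal_singleton (need x : List Char) : aVal need [x] = tokenScore need x := by
  rw [aVal_cons]
  have hnil : aVal need [] = 2 := by unfold aVal avC; simp
  rw [hnil]
  have := tokenScore_bounds need x
  omega

theorem partComma_none (l h : List Char) (hp : partComma l = (h, none)) :
    h = l ∧ splitComma l = [l] := by
  induction l generalizing h with
  | nil => simp [partComma] at hp; simp [hp.symm, splitComma]
  | cons c rest ih =>
    by_cases hc : c = ','
    · simp [partComma, hc] at hp
    · simp only [partComma, if_neg hc] at hp
      cases hpr : partComma rest with
      | mk h' o =>
        rw [hpr] at hp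
        simp at hp
        obtain ⟨rfl, ho⟩ := hp
        cases o with
        | some t => simp at ho
        | none =>
          obtain ⟨hh, hs⟩ := ih h' hpr
          subst hh
          exact ⟨rfl, by simp [splitComma, hc, hs]⟩

theorem partComma_some (l h t : List Char) (hp : partComma l = (h, some t)) :
    splitComma l = h :: splitComma t := by
  induction l generalizing h t with
  | nil => simp [partComma] at hp
  | cons c rest ih =>
    by_cases hc : c = ','
    · simp [partComma, hc] at hp
      obtain ⟨rfl, rfl⟩ := hp
      simp [splitComma, hc]
    · simp only [partComma, if_neg hc] at hp
      cases hpr : partComma rest with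
      | mk h' o =>
        rw [hpr] at hp
        simp at hp
        obtain ⟨rfl, ho⟩ := hp
        cases o with
        | none => simp at ho
        | some t' =>
          simp at ho
          subst ho
          simp only [splitComma, if_neg hc, ih h' t' hpr]


theorem srLoop_eq (need l : List Char) (best : Int) :
    srLoop need l best = min best (aVal need (splitComma l)) := by
  refine srLoop.induct need
    (fun l best => srLoop need l best = min best (aVal need (splitComma l))) ?_ ?_ l best
  · intro rest best head hp
    obtain ⟨rfl, hs⟩ := partComma_none rest head hp
    rw [srLoop.eq_def, hp, hs, aVal_singleton]
  · intro rest best head tail hp ih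
    rw [srLoop.eq_def, hp]
    dsimp only
    rw [ih, partComma_some rest head tail hp, aVal_cons, min_assoc]

-- ===== VERDICT (by name: the statement is the Claim_ definition above) =====
theorem skill_relevance_spec : Claim_equal_skill_relevance := by
  intro nc vs _
  unfold Spec_skill_relevance skill_relevance skill_relevance_alt
  rw [srLoop_eq]
  have hsplit : PySem.Chars.split? vs.toList [','] = some (splitComma vs.toList) := by
    rw [PySem.Chars.split?]
    simp [splitOn_comma]
  rw [hsplit]
  have := (aVal_bounds (PySem.Chars.strip (PySem.Chars.lower nc.toList)) (splitComma vs.toList)).2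
  rw [min_eq_right this]
  rfl
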